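-- pv_equiv track=rewrite | github.com/kaizen-38/AgentClinic | medical_agent/agents/diagnosis_resolver.py | _best_choice_match
-- ===== SOURCE A (Python) =====
-- from typing import List, Optional
--
-- def _best_choice_match(diagnosis: str, choices: List[str]) -> Optional[str]:
--     """Find the best matching answer choice using substring overlap."""
--     diag_lower = diagnosis.lower()
--     best_choice = None
--     best_overlap = 0
--
--     for choice in choices:
--         choice_lower = choice.lower()
--         # Count common words
--         diag_words = set(diag_lower.split())
--         choice_words = set(choice_lower.split())
--         overlap = len(diag_words & choice_words)
--         if overlap > best_overlap:
--             best_overlap = overlap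
--             best_choice = choice
--
--     return best_choice if best_overlap > 0 else None
-- ===== SOURCE B (Python) =====
-- from typing import List, Optional
--
-- def _best_choice_match(diagnosis: str, choices: List[str]) -> Optional[str]:
--     """Inverted-index version: scatter diagnosis words over a word -> choice-indices index."""
--     diag_words = set(diagnosis.lower().split())
--     index = {}
--     for i, choice in enumerate(choices):
--         for w in set(choice.lower().split()):
--             index.setdefault(w, []).append(i)
--     counts = [0] * len(choices)
--     for w in diag_words:
--         for i in index.get(w, []):
--             counts[i] += 1
--     best_i = None
--     best = 0
--     for i, c in enumerate(counts):
--         if c > best: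
--             best = c
--             best_i = i
--     return choices[best_i] if best_i is not None else None
-- ===== Notes on version B (the rewrite author's own statement) =====
-- stated objective: faster
-- what changed: Replaces A's per-choice recomputation of the diagnosis word set and set intersection by building an inverted index (word -> list of choice indices) in one pass, scattering each diagnosis word over its posting list to accumulate per-index overlap counts, and scanning the counts for the earliest strict maximum.
import Mathlib
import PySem

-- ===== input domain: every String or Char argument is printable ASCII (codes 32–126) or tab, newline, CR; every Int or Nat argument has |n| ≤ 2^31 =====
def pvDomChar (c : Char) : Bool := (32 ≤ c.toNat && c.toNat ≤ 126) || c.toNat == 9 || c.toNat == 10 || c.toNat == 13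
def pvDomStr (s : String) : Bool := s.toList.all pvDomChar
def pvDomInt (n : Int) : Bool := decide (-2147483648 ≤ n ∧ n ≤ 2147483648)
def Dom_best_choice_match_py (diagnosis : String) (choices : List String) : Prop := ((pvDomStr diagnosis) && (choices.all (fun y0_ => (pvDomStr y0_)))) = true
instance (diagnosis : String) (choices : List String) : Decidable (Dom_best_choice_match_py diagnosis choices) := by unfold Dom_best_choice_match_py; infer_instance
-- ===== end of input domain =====

-- B replaces A's per-choice diagnosis-set rebuild + intersection by a one-pass inverted index
-- (word -> choice indices) with scatter-accumulated overlap counts and an argmax scan (measured faster).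

-- ===== PORT A =====
def best_choice_match_py (diagnosis : String) (choices : List String) : Option String :=
  let diagLower := PySem.Str.lower diagnosis
  let r := choices.foldl
    (fun (st : Option String × Int) choice =>
      let choiceLower := PySem.Str.lower choice
      let diagWords := PySem.Set.ofList (PySem.Str.split₀ diagLower)
      let choiceWords := PySem.Set.ofList (PySem.Str.split₀ choiceLower)
      let overlap := PySem.Set.len (PySem.Set.inter diagWords choiceWords)
      if st.2 < overlap then (some choice, overlap) else st)
    (none, 0)
  if 0 < r.2 then r.1 else none

-- ===== PORT B =====
-- index.setdefault(w, []).append(i) = insert w (getD w [] ++ [i])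
def bcmIndex (choices : List String) : PySem.Dict String (List Int) :=
  (PySem.List.enumerate choices).foldl
    (fun d p =>
      (PySem.Set.ofList (PySem.Str.split₀ (PySem.Str.lower p.2))).foldl
        (fun d w => d.insert w (d.getD w [] ++ [p.1])) d)
    PySem.Dict.empty

def best_choice_match_py_alt (diagnosis : String) (choices : List String) : Option String :=
  let diagWords := PySem.Set.ofList (PySem.Str.split₀ (PySem.Str.lower diagnosis))
  let index := bcmIndex choices
  let counts0 : List Int := List.replicate choices.length 0
  let counts := diagWords.foldl
    (fun counts w =>
      (index.getD w []).foldl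
        (fun c i => PySem.List.pySetD c i (PySem.List.pyGetD c i 0 + 1)) counts)
    counts0
  let r := (PySem.List.enumerate counts).foldl
    (fun (st : Option Int × Int) q => if st.2 < q.2 then (some q.1, q.2) else st)
    (none, 0)
  match r.1 with
  | some i => some (PySem.List.pyGetD choices i "")
  | none => none

-- ===== PRECONDITION & SPEC =====
def Spec_best_choice_match_py (diagnosis : String) (choices : List String) (out : Option String) : Prop := out = best_choice_match_py_alt diagnosis choices
instance (diagnosis : String) (choices : List String) (out : Option String) : Decidable (Spec_best_choice_match_py diagnosis choices out) := by unfold Spec_best_choice_match_py; infer_instance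

-- ===== CLAIM (what is proved, stated in full; the proofs are below) =====
def Claim_equal_best_choice_match_py : Prop := ∀ (diagnosis : String) (choices : List String), Dom_best_choice_match_py diagnosis choices → Spec_best_choice_match_py diagnosis choices (best_choice_match_py diagnosis choices)

-- ===== LEMMAS AND PROOFS =====


-- the lowercased word set of a string, and the overlap A computes for one choice
def bcmWset (c : String) : PySem.Set String := PySem.Set.ofList (PySem.Str.split₀ (PySem.Str.lower c))

def bcmOvl (diagnosis c : String) : Int :=
  PySem.Set.len (PySem.Set.inter (bcmWset diagnosis) (bcmWset c))

lemma bcmOvl_nonneg (diagnosis c : String) : 0 ≤ bcmOvl diagnosis c := by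
  simp [bcmOvl, PySem.Set.len]


lemma bcmOvl_eq_countP (diagnosis c : String) :
    bcmOvl diagnosis c
      = ((bcmWset diagnosis).countP (fun w => decide (w ∈ bcmWset c)) : Int) := by
  have h : (fun x => PySem.Set.contains (bcmWset c) x) = (fun w => decide (w ∈ bcmWset c)) := by
    funext x
    simp [PySem.Set.contains, List.contains_iff_mem]
  simp only [bcmOvl, PySem.Set.len, PySem.Set.inter, List.countP_eq_length_filter, h]

lemma bcm_idx_inner (ws : List String) (hnd : ws.Nodup) :
    ∀ (d : PySem.Dict String (List Int)) (i : Int) (w : String),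
      (ws.foldl (fun d w => d.insert w (d.getD w [] ++ [i])) d).getD w []
        = if w ∈ ws then d.getD w [] ++ [i] else d.getD w [] := by
  induction ws with
  | nil => intro d i w; simp
  | cons w0 ws ih =>
    intro d i w
    rcases List.nodup_cons.mp hnd with ⟨h0, h1⟩
    simp only [List.foldl_cons]
    rw [ih h1, PySem.Dict.getD_insert]
    by_cases hw : w ∈ ws
    · have : w ≠ w0 := fun h => h0 (h ▸ hw)
      simp [hw, this]
    · by_cases he : w = w0 <;> simp [hw, he, h0]

lemma bcm_enum_eq {α : Type} (dflt : α) :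
    ∀ (cs : List α) (k : Int), PySem.List.enumerate cs k
      = (List.range cs.length).map (fun (j : Nat) => ((k + j : Int), cs.getD j dflt)) := by
  intro cs
  induction cs with
  | nil => intro k; simp [PySem.List.enumerate]
  | cons c cs ih =>
    intro k
    simp only [PySem.List.enumerate, List.length_cons, List.range_succ_eq_map,
      List.map_cons, List.map_map, ih (k + 1)]
    congr 1
    · simp
    · apply List.map_congr_left
      intro j hj
      simp only [Function.comp_apply, Prod.mk.injEq]
      constructor
      · push_cast; ring
      · rfl

lemma bcm_range_filter_map_succ (P : Nat → Bool) (n : Nat) (k : Int) :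
    ((List.range (n+1)).filter P).map (fun (j : Nat) => (k + j : Int))
      = (if P 0 then [k] else []) ++
        ((List.range n).filter (fun j => P (j+1))).map (fun (j : Nat) => ((k+1) + j : Int)) := by
  rw [List.range_succ_eq_map]
  simp only [List.filter_cons, List.filter_map]
  by_cases h : P 0
  · simp only [h, if_pos, List.map_cons, List.map_map, List.cons_append, List.nil_append]
    congr 1
    · simp
    · apply List.map_congr_left
      intro j hj
      simp only [Function.comp_apply]
      push_cast; ring
  · simp only [h, Bool.false_eq_true, if_false, List.map_map, List.nil_append]
    apply List.map_congr_left
    intro j hj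
    simp only [Function.comp_apply]
    push_cast; ring

lemma bcm_idx_spec (cs : List String) :
    ∀ (k : Int) (d : PySem.Dict String (List Int)) (w : String),
      (((PySem.List.enumerate cs k).foldl
        (fun d p =>
          (PySem.Set.ofList (PySem.Str.split₀ (PySem.Str.lower p.2))).foldl
            (fun d w => d.insert w (d.getD w [] ++ [p.1])) d) d).getD w [])
        = d.getD w [] ++
            (((List.range cs.length).filter
                (fun j => decide (w ∈ bcmWset (cs.getD j "")))).map (fun (j : Nat) => (k + j : Int))) := by
  induction cs with
  | nil => intro k d w; simp [PySem.List.enumerate]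
  | cons c cs ih =>
    intro k d w
    simp only [PySem.List.enumerate, List.foldl_cons]
    rw [ih (k + 1)]
    rw [bcm_idx_inner _ (PySem.Set.nodup_ofList _)]
    rw [List.length_cons, bcm_range_filter_map_succ]
    have hP : ∀ j : Nat, (decide (w ∈ bcmWset ((c :: cs).getD (j+1) "")) : Bool)
        = decide (w ∈ bcmWset (cs.getD j "")) := by
      intro j; rw [List.getD_cons_succ]
    simp only [List.getD_cons_zero, hP]
    by_cases hw : w ∈ bcmWset c
    · have hw' : w ∈ PySem.Set.ofList (PySem.Str.split₀ (PySem.Str.lower c)) := hw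
      rw [if_pos hw', if_pos (by simpa using hw)]
      simp [List.append_assoc]
    · have hw' : w ∉ PySem.Set.ofList (PySem.Str.split₀ (PySem.Str.lower c)) := hw
      rw [if_neg hw']
      rw [if_neg (by simpa using hw)]
      simp

lemma bcm_empty_getD (w : String) : (PySem.Dict.empty : PySem.Dict String (List Int)).getD w [] = [] := rfl

lemma bcmIndex_getD (choices : List String) (w : String) :
    (bcmIndex choices).getD w []
      = (((List.range choices.length).filter
            (fun j => decide (w ∈ bcmWset (choices.getD j "")))).map (fun (j : Nat) => (j : Int))) := by
  unfold bcmIndex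
  rw [bcm_idx_spec choices 0 PySem.Dict.empty w, bcm_empty_getD]
  simp

lemma bcm_getD_set (c : List Int) (j t : Nat) (v : Int) (h : j < c.length) :
    (c.set j v).getD t 0 = if t = j then v else c.getD t 0 := by
  by_cases ht : t = j
  · subst ht
    simp [List.getD_eq_getElem?_getD, List.getElem?_set, h]
  · simp [List.getD_eq_getElem?_getD, List.getElem?_set, ht, Ne.symm ht]

lemma bcm_scat (js : List Nat) :
    ∀ (c : List Int), (∀ j ∈ js, j < c.length) →
      (js.foldl (fun c j => c.set j (c.getD j 0 + 1)) c).length = c.length ∧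
      ∀ t, (js.foldl (fun c j => c.set j (c.getD j 0 + 1)) c).getD t 0
              = c.getD t 0 + (js.count t : Int) := by
  induction js with
  | nil => intro c h; simp
  | cons j0 js ih =>
    intro c h
    have hj0 : j0 < c.length := h j0 (by simp)
    have hlen : (c.set j0 (c.getD j0 0 + 1)).length = c.length := by simp
    have h' : ∀ j ∈ js, j < (c.set j0 (c.getD j0 0 + 1)).length := by
      intro j hj; rw [hlen]; exact h j (List.mem_cons_of_mem _ hj)
    rcases ih (c.set j0 (c.getD j0 0 + 1)) h' with ⟨ih1, ih2⟩
    constructor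
    · rw [List.foldl_cons]; exact ih1.trans hlen
    · intro t
      rw [List.foldl_cons, ih2 t, bcm_getD_set c j0 t _ hj0, List.count_cons]
      by_cases ht : t = j0
      · subst ht
        rw [if_pos rfl, if_pos (by exact decide_eq_true rfl)]
        push_cast; ring
      · rw [if_neg ht, if_neg (by simpa using fun h => ht h.symm)]
        push_cast; ring

lemma bcm_count_mem (js : List Nat) (hnd : js.Nodup) (t : Nat) :
    js.count t = if t ∈ js then 1 else 0 := by
  by_cases h : t ∈ js
  · simp [h, List.count_eq_one_of_mem hnd h]
  · simp [h, List.count_eq_zero_of_not_mem h]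

lemma bcm_counts_spec (choices : List String) (dws : List String) :
    ∀ (c : List Int), c.length = choices.length →
      ((dws.foldl
        (fun counts w =>
          ((bcmIndex choices).getD w []).foldl
            (fun c i => PySem.List.pySetD c i (PySem.List.pyGetD c i 0 + 1)) counts) c).length
          = choices.length ∧
      ∀ t : Nat, (dws.foldl
        (fun counts w =>
          ((bcmIndex choices).getD w []).foldl
            (fun c i => PySem.List.pySetD c i (PySem.List.pyGetD c i 0 + 1)) counts) c).getD t 0
          = c.getD t 0 + (dws.countP (fun w => decide (t < choices.length ∧ w ∈ bcmWset (choices.getD t ""))) : Int)) := by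
  induction dws with
  | nil => intro c hc; exact ⟨hc, fun t => by simp⟩
  | cons w dws ih =>
    intro c hc
    have hinner : ∀ (c' : List Int), c'.length = choices.length →
        (((bcmIndex choices).getD w []).foldl
            (fun c i => PySem.List.pySetD c i (PySem.List.pyGetD c i 0 + 1)) c').length = choices.length ∧
        ∀ t : Nat, (((bcmIndex choices).getD w []).foldl
            (fun c i => PySem.List.pySetD c i (PySem.List.pyGetD c i 0 + 1)) c').getD t 0
          = c'.getD t 0 + (if t < choices.length ∧ w ∈ bcmWset (choices.getD t "") then 1 else 0) := by
      intro c' hc'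
      rw [bcmIndex_getD, List.foldl_map]
      have hfun : (fun (c : List Int) (j : Nat) =>
          PySem.List.pySetD c (j : Int) (PySem.List.pyGetD c (j : Int) 0 + 1))
          = fun c j => c.set j (c.getD j 0 + 1) := by
        funext c j
        rw [PySem.List.pySetD_natCast, PySem.List.pyGetD_natCast]
      rw [hfun]
      set js := ((List.range choices.length).filter
            (fun j => decide (w ∈ bcmWset (choices.getD j "")))) with hjs
      have hmem : ∀ j ∈ js, j < c'.length := by
        intro j hj
        rw [hc']
        exact List.mem_range.mp (List.mem_filter.mp hj).1
      rcases bcm_scat js c' hmem with ⟨s1, s2⟩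
      refine ⟨by rw [s1, hc'], ?_⟩
      intro t
      rw [s2 t, bcm_count_mem js (List.Nodup.filter _ (List.nodup_range)) t]
      have hiff : (t ∈ js) ↔ (t < choices.length ∧ w ∈ bcmWset (choices.getD t "")) := by
        rw [hjs]
        constructor
        · intro hm
          rcases List.mem_filter.mp hm with ⟨h1, h2⟩
          exact ⟨List.mem_range.mp h1, of_decide_eq_true h2⟩
        · rintro ⟨h1, h2⟩
          exact List.mem_filter.mpr ⟨List.mem_range.mpr h1, decide_eq_true h2⟩
      by_cases h : t < choices.length ∧ w ∈ bcmWset (choices.getD t "")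
      · rw [if_pos (hiff.mpr h), if_pos h]; norm_num
      · rw [if_neg (fun hm => h (hiff.mp hm)), if_neg h]; push_cast; ring
    rcases hinner c hc with ⟨i1, i2⟩
    simp only [List.foldl_cons]
    rcases ih _ i1 with ⟨o1, o2⟩
    refine ⟨o1, ?_⟩
    intro t
    rw [o2 t, i2 t, List.countP_cons]
    by_cases h : t < choices.length ∧ w ∈ bcmWset (choices.getD t "")
    · rw [if_pos h, if_pos (by exact decide_eq_true h)]
      push_cast; ring
    · rw [if_neg h, if_neg (by simpa using h)]
      push_cast; ring


lemma bcm_counts_eq_map (diagnosis : String) (choices : List String) :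
    ((PySem.Set.ofList (PySem.Str.split₀ (PySem.Str.lower diagnosis))).foldl
      (fun counts w =>
        ((bcmIndex choices).getD w []).foldl
          (fun c i => PySem.List.pySetD c i (PySem.List.pyGetD c i 0 + 1)) counts)
      (List.replicate choices.length (0 : Int)))
      = choices.map (fun c => bcmOvl diagnosis c) := by
  rcases bcm_counts_spec choices (PySem.Set.ofList (PySem.Str.split₀ (PySem.Str.lower diagnosis)))
      (List.replicate choices.length (0 : Int)) (by simp) with ⟨l1, l2⟩
  apply List.ext_getElem
  · rw [l1, List.length_map]
  · intro t h1 h2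
    have ht : t < choices.length := by simpa using h2
    rw [← List.getD_eq_getElem _ 0 h1, l2 t, List.getElem_map]
    have hrep : (List.replicate choices.length (0 : Int)).getD t 0 = 0 := by
      simp [List.getD_eq_getElem?_getD, List.getElem?_replicate, ht]
    have hfun : (fun w => decide (t < choices.length ∧ w ∈ bcmWset (choices.getD t "")))
        = (fun w => decide (w ∈ bcmWset (choices.getD t ""))) := by
      funext w; simp [ht]
    rw [hrep, hfun,
      show PySem.Set.ofList (PySem.Str.split₀ (PySem.Str.lower diagnosis)) = bcmWset diagnosis from rfl,
      ← bcmOvl_eq_countP diagnosis (choices.getD t "")]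
    rw [List.getD_eq_getElem _ _ ht]
    ring

lemma bcm_enum_snd {α : Type} : ∀ (xs : List α) (k : Int),
    (PySem.List.enumerate xs k).map Prod.snd = xs := by
  intro xs
  induction xs with
  | nil => intro k; simp [PySem.List.enumerate]
  | cons x xs ih => intro k; simp [PySem.List.enumerate, ih]

lemma bcm_enum_map {α β : Type} (f : α → β) : ∀ (xs : List α) (k : Int),
    PySem.List.enumerate (xs.map f) k
      = (PySem.List.enumerate xs k).map (fun p => (p.1, f p.2)) := by
  intro xs
  induction xs with
  | nil => intro k; simp [PySem.List.enumerate]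
  | cons x xs ih => intro k; simp [PySem.List.enumerate, ih]

lemma bcm_scan (full : List String) (g : String → Int) (hg : ∀ c, 0 ≤ g c) :
    ∀ (ps : List (Int × String)) (a : Option String) (b : Option Int) (v : Int),
      (∀ p ∈ ps, PySem.List.pyGetD full p.1 "" = p.2) →
      (b = none ↔ v = 0) → 0 ≤ v →
      (∀ i, b = some i → a = some (PySem.List.pyGetD full i "")) →
      (b = none → a = none) →
      ((ps.foldl (fun st p => if st.2 < g p.2 then (some p.2, g p.2) else st) (a, v)).2
          = ((ps.map (fun p => (p.1, g p.2))).foldl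
              (fun st q => if st.2 < q.2 then (some q.1, q.2) else st) (b, v)).2 ∧
       (((ps.map (fun p => (p.1, g p.2))).foldl
              (fun st q => if st.2 < q.2 then (some q.1, q.2) else st) (b, v)).1 = none ↔
          ((ps.map (fun p => (p.1, g p.2))).foldl
              (fun st q => if st.2 < q.2 then (some q.1, q.2) else st) (b, v)).2 = 0) ∧
       0 ≤ ((ps.map (fun p => (p.1, g p.2))).foldl
              (fun st q => if st.2 < q.2 then (some q.1, q.2) else st) (b, v)).2 ∧
       (∀ i, ((ps.map (fun p => (p.1, g p.2))).foldl
              (fun st q => if st.2 < q.2 then (some q.1, q.2) else st) (b, v)).1 = some i →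
          (ps.foldl (fun st p => if st.2 < g p.2 then (some p.2, g p.2) else st) (a, v)).1
            = some (PySem.List.pyGetD full i "")) ∧
       (((ps.map (fun p => (p.1, g p.2))).foldl
              (fun st q => if st.2 < q.2 then (some q.1, q.2) else st) (b, v)).1 = none →
          (ps.foldl (fun st p => if st.2 < g p.2 then (some p.2, g p.2) else st) (a, v)).1 = none)) := by
  intro ps
  induction ps with
  | nil =>
    intro a b v hfull hbv hv hsome hnone
    exact ⟨rfl, hbv, hv, fun i hi => hsome i hi, hnone⟩
  | cons p ps ih =>
    intro a b v hfull hbv hv hsome hnone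
    simp only [List.map_cons, List.foldl_cons]
    by_cases hlt : v < g p.2
    · rw [if_pos hlt, if_pos hlt]
      refine ih (some p.2) (some p.1) (g p.2) (fun q hq => hfull q (List.mem_cons_of_mem _ hq))
        ?_ (hg p.2) ?_ ?_
      · constructor
        · intro h; cases h
        · intro h; omega
      · intro i hi
        cases hi
        rw [hfull p (List.mem_cons_self)]
      · intro h; cases h
    · rw [if_neg hlt, if_neg hlt]
      exact ih a b v (fun q hq => hfull q (List.mem_cons_of_mem _ hq)) hbv hv hsome hnone

lemma bcm_scan_final (full : List String) (g : String → Int) (hg : ∀ c, 0 ≤ g c)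
    (ps : List (Int × String)) (hfull : ∀ p ∈ ps, PySem.List.pyGetD full p.1 "" = p.2) :
    (if 0 < (ps.foldl (fun st p => if st.2 < g p.2 then (some p.2, g p.2) else st)
        ((none : Option String), (0 : Int))).2 then
      (ps.foldl (fun st p => if st.2 < g p.2 then (some p.2, g p.2) else st)
        ((none : Option String), (0 : Int))).1 else none)
      = (match ((ps.map (fun p => (p.1, g p.2))).foldl
          (fun st q => if st.2 < q.2 then (some q.1, q.2) else st)
          ((none : Option Int), (0 : Int))).1 with
        | some i => some (PySem.List.pyGetD full i "")
        | none => none) := by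
  rcases bcm_scan full g hg ps none none 0 hfull (by simp) le_rfl
      (by intro i h; cases h) (by intro _; rfl) with ⟨h1, h2, h3, h4, h5⟩
  cases hb : ((ps.map (fun p => (p.1, g p.2))).foldl
      (fun st q => if st.2 < q.2 then (some q.1, q.2) else st)
      ((none : Option Int), (0 : Int))).1 with
  | none =>
    rw [hb] at h2
    have hz : (ps.foldl (fun st p => if st.2 < g p.2 then (some p.2, g p.2) else st)
        ((none : Option String), (0 : Int))).2 = 0 := h1.trans (h2.mp rfl)
    rw [if_neg (by rw [hz]; exact lt_irrefl 0)]
  | some i =>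
    have hne : ((ps.map (fun p => (p.1, g p.2))).foldl
        (fun st q => if st.2 < q.2 then (some q.1, q.2) else st)
        ((none : Option Int), (0 : Int))).2 ≠ 0 := by
      intro h0
      rw [h2.mpr h0] at hb
      cases hb
    rw [if_pos (by rw [h1]; omega)]
    exact h4 i hb

lemma bcm_main (diagnosis : String) (choices : List String) :
    best_choice_match_py diagnosis choices = best_choice_match_py_alt diagnosis choices := by
  simp only [best_choice_match_py, best_choice_match_py_alt]
  rw [bcm_counts_eq_map diagnosis choices, bcm_enum_map (fun c => bcmOvl diagnosis c) choices 0]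
  conv_lhs => rw [← bcm_enum_snd choices 0, List.foldl_map]
  have hfull : ∀ p ∈ PySem.List.enumerate choices 0, PySem.List.pyGetD choices p.1 "" = p.2 := by
    intro p hp
    rw [bcm_enum_eq "" choices 0] at hp
    rcases List.mem_map.mp hp with ⟨j, hj, rfl⟩
    simp only [zero_add]
    rw [PySem.List.pyGetD_natCast]
  exact bcm_scan_final choices (fun c => bcmOvl diagnosis c) (fun c => bcmOvl_nonneg diagnosis c)
    (PySem.List.enumerate choices 0) hfull

-- ===== VERDICT (by name: the statement is the Claim_ definition above) =====
theorem best_choice_match_py_spec : Claim_equal_best_choice_match_py := by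
  intro diagnosis choices _
  unfold Spec_best_choice_match_py
  exact bcm_main diagnosis choices
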